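-- pv_equiv track=rewrite | github.com/Wpawlina/AGH-ITCS-Course | cwiczenia/tablice jednowymiarowe 3/sumaSasiadow17.py | zad17
-- ===== SOURCE A (Python) =====
-- def zad17(t):
--     n=len(t)
--     maxs=0
--     maxi=0
--     maxj=0
--     moves=[(-1,-1),(-1,0),(-1,1),(0,1),(1,1),(1,0),(1,-1),(0,-1)]
--     for i in range(n):
--         for j in range(n):
--             sumc=0
--             for move in moves:
--                 if  0 <= i+move[0] < n and 0<= j+move[1]<n:
--                     sumc+=t[i+move[0]][j+move[1]]
--             if sumc>maxs:
--                 maxs=sumc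
--                 maxi=i
--                 maxj=j
--     return maxi,maxj
--
-- t=[
--     [2,2,2],
--     [2,1000,5],
--     [2,2,3]
-- ]
-- ===== SOURCE B (Python) =====
-- def zad17(t):
--     n = len(t)
--     moves = [(-1,-1),(-1,0),(-1,1),(0,1),(1,1),(1,0),(1,-1),(0,-1)]
--     # scatter: add each cell's value to every in-bounds neighbor's total
--     sums = {}
--     for i in range(n):
--         for j in range(n):
--             for di, dj in moves:
--                 x = i + di
--                 y = j + dj
--                 if 0 <= x < n and 0 <= y < n:
--                     sums[(x, y)] = sums.get((x, y), 0) + t[i][j]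
--     maxs = 0
--     maxi = 0
--     maxj = 0
--     for i in range(n):
--         for j in range(n):
--             if sums.get((i, j), 0) > maxs:
--                 maxs = sums.get((i, j), 0)
--                 maxi = i
--                 maxj = j
--     return maxi, maxj
-- ===== Notes on version B (the rewrite author's own statement) =====
-- stated objective: alternative
-- what changed: B inverts A's gather: instead of summing 8 neighbors per cell, it scatters each cell's value into a dict of neighbor totals keyed by (row,col), then does a separate first-max scan over the table; symmetry of the 8-move set makes the scattered totals equal A's gathered sums.
import Mathlib
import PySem

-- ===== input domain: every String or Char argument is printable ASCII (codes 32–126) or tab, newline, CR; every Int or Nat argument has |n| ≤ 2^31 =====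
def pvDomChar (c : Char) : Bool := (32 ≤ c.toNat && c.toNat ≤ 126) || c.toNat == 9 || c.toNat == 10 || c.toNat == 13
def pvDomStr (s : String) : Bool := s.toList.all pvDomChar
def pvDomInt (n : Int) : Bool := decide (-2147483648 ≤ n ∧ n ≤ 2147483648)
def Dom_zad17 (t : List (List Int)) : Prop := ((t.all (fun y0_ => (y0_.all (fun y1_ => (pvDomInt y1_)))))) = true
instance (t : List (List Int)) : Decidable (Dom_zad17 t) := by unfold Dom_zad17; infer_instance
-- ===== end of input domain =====

-- B inverts A's per-cell gather of 8 neighbor values into a scatter: each cell's value is added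
-- into a dict of neighbor totals keyed by (row,col), then a separate first-max scan reads the table
-- (alternative algorithm; equal by symmetry of the 8-move set).

-- ===== PORT A =====
def zad17 (t : List (List Int)) : Int × Int :=
  let n : Int := PySem.List.len t
  let moves : List (Int × Int) := [(-1,-1),(-1,0),(-1,1),(0,1),(1,1),(1,0),(1,-1),(0,-1)]
  let st : Int × Int × Int :=
    (PySem.List.pyRange 0 n 1).foldl (fun s i =>
      (PySem.List.pyRange 0 n 1).foldl (fun s j =>
        let sumc : Int := moves.foldl (fun sc mv =>
          if (0 ≤ i + mv.1 ∧ i + mv.1 < n) ∧ (0 ≤ j + mv.2 ∧ j + mv.2 < n) then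
            sc + PySem.List.pyGetD (PySem.List.pyGetD t (i + mv.1) []) (j + mv.2) 0
          else sc) 0
        if sumc > s.1 then (sumc, i, j) else s) s)
      (0, 0, 0)
  (st.2.1, st.2.2)

-- ===== PORT B =====
def zad17_alt (t : List (List Int)) : Int × Int :=
  let n : Int := PySem.List.len t
  let moves : List (Int × Int) := [(-1,-1),(-1,0),(-1,1),(0,1),(1,1),(1,0),(1,-1),(0,-1)]
  -- scatter: sums[(x,y)] = sums.get((x,y),0) + t[i][j] for every in-bounds neighbor (x,y) of (i,j)
  let sums : PySem.Dict (Int × Int) Int :=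
    (PySem.List.pyRange 0 n 1).foldl (fun d i =>
      (PySem.List.pyRange 0 n 1).foldl (fun d j =>
        moves.foldl (fun d mv =>
          if (0 ≤ i + mv.1 ∧ i + mv.1 < n) ∧ (0 ≤ j + mv.2 ∧ j + mv.2 < n) then
            d.insert (i + mv.1, j + mv.2)
              (d.getD (i + mv.1, j + mv.2) 0 + PySem.List.pyGetD (PySem.List.pyGetD t i []) j 0)
          else d) d) d)
      PySem.Dict.empty
  let st : Int × Int × Int :=
    (PySem.List.pyRange 0 n 1).foldl (fun s i =>
      (PySem.List.pyRange 0 n 1).foldl (fun s j =>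
        if sums.getD (i, j) 0 > s.1 then (sums.getD (i, j) 0, i, j) else s) s)
      (0, 0, 0)
  (st.2.1, st.2.2)

-- ===== PRECONDITION & SPEC =====
-- Pre_ excludes exactly the ragged grids on which A raises IndexError: for n = len(t) ≥ 2 A reads
-- every t[x][y] with x,y < n, so it raises iff some row is shorter than n (for n ≤ 1 A reads nothing).
def Pre_zad17 (t : List (List Int)) : Prop := 2 ≤ t.length → ∀ row ∈ t, t.length ≤ row.length
instance (t : List (List Int)) : Decidable (Pre_zad17 t) := by unfold Pre_zad17; infer_instance
def pvWitness_zad17 : List (List Int) := [[2, 2, 2], [2, 1000, 5], [2, 2, 3]]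

def Spec_zad17 (t : List (List Int)) (out : Int × Int) : Prop := out = zad17_alt t
instance (t : List (List Int)) (out : Int × Int) : Decidable (Spec_zad17 t out) := by unfold Spec_zad17; infer_instance

-- ===== CLAIM (what is proved, stated in full; the proofs are below) =====
def Claim_equal_zad17 : Prop := ∀ (t : List (List Int)), Dom_zad17 t → Pre_zad17 t → Spec_zad17 t (zad17 t)

-- ===== LEMMAS AND PROOFS =====

-- contribution of scatter event (i, j, mv) to table entry p
def zadDlt (t : List (List Int)) (n : Int) (p : Int × Int) (i j : Int) (mv : Int × Int) : Int :=
  if ((0 ≤ i + mv.1 ∧ i + mv.1 < n) ∧ (0 ≤ j + mv.2 ∧ j + mv.2 < n)) ∧ p = (i + mv.1, j + mv.2)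
  then PySem.List.pyGetD (PySem.List.pyGetD t i []) j 0 else 0

-- a fold whose every step adds a d-independent amount to entry p adds the sum of the amounts
theorem getD_foldl_add_entry {ι : Type} (p : Int × Int) (h : ι → Int)
    (L : List ι) (F : PySem.Dict (Int × Int) Int → ι → PySem.Dict (Int × Int) Int)
    (hF : ∀ d x, x ∈ L → (F d x).getD p 0 = d.getD p 0 + h x) :
    ∀ d : PySem.Dict (Int × Int) Int,
      (L.foldl F d).getD p 0 = d.getD p 0 + (L.map h).sum := by
  induction L with
  | nil => intro d; simp
  | cons e L ih =>
    intro d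
    simp only [List.foldl_cons, List.map_cons, List.sum_cons]
    rw [ih (fun d x hx => hF d x (List.mem_cons_of_mem e hx)), hF d e (List.mem_cons_self)]
    ring

-- delta-sum over a range collapses to the single in-range index
theorem sum_delta (g : Int → Int) (c : Int) (a b : Int) :
    ((PySem.List.pyRange a b 1).map (fun x => if x = c then g x else 0)).sum
      = if a ≤ c ∧ c < b then g c else 0 := by
  have H : ∀ (k : Nat) (a : Int), b - a ≤ (k : Int) →
      ((PySem.List.pyRange a b 1).map (fun x => if x = c then g x else 0)).sum
        = if a ≤ c ∧ c < b then g c else 0 := by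
    intro k
    induction k with
    | zero =>
      intro a h
      rw [PySem.List.pyRange_one_eq_nil (by omega), if_neg (by omega)]
      rfl
    | succ k ih =>
      intro a h
      by_cases hab : a < b
      · rw [PySem.List.pyRange_one_cons hab]
        simp only [List.map_cons, List.sum_cons]
        rw [ih (a + 1) (by omega)]
        by_cases hac : a = c
        · subst hac
          rw [if_pos rfl, if_neg (by omega), if_pos (by omega)]
          ring
        · rw [if_neg hac]
          by_cases hc : a + 1 ≤ c ∧ c < b
          · rw [if_pos hc, if_pos (by omega)]; ring
          · rw [if_neg hc, if_neg (by omega)]; ring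
      · rw [PySem.List.pyRange_one_eq_nil (by omega), if_neg (by omega)]
        rfl
  exact H (b - a).toNat a (by omega)

-- sums over two index lists commute
theorem sum_map_comm {α β : Type} (l : List α) (m : List β) (g : α → β → Int) :
    (l.map (fun i => (m.map (g i)).sum)).sum
      = (m.map (fun j => (l.map (fun i => g i j)).sum)).sum := by
  induction l with
  | nil => simp
  | cons x l ih =>
    simp only [List.map_cons, List.sum_cons, ih]
    rw [PySem.List.sum_map_add_int]

-- the scatter table entry p equals the triple contribution sum
theorem scatter_getD (t : List (List Int)) (n : Int) (p : Int × Int) :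
    ((PySem.List.pyRange 0 n 1).foldl (fun d i =>
        (PySem.List.pyRange 0 n 1).foldl (fun d j =>
          ([((-1:Int),(-1:Int)),(-1,0),(-1,1),(0,1),(1,1),(1,0),(1,-1),(0,-1)]).foldl (fun d mv =>
            if (0 ≤ i + mv.1 ∧ i + mv.1 < n) ∧ (0 ≤ j + mv.2 ∧ j + mv.2 < n) then
              d.insert (i + mv.1, j + mv.2)
                (d.getD (i + mv.1, j + mv.2) 0 + PySem.List.pyGetD (PySem.List.pyGetD t i []) j 0)
            else d) d) d)
        PySem.Dict.empty).getD p 0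
      = ((PySem.List.pyRange 0 n 1).map (fun i =>
          ((PySem.List.pyRange 0 n 1).map (fun j =>
            (([((-1:Int),(-1:Int)),(-1,0),(-1,1),(0,1),(1,1),(1,0),(1,-1),(0,-1)]).map
              (zadDlt t n p i j)).sum)).sum)).sum := by
  have h3 : ∀ i j (d : PySem.Dict (Int × Int) Int) (mv : Int × Int),
      mv ∈ ([((-1:Int),(-1:Int)),(-1,0),(-1,1),(0,1),(1,1),(1,0),(1,-1),(0,-1)] : List (Int × Int)) →
      ((if (0 ≤ i + mv.1 ∧ i + mv.1 < n) ∧ (0 ≤ j + mv.2 ∧ j + mv.2 < n) then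
          d.insert (i + mv.1, j + mv.2)
            (d.getD (i + mv.1, j + mv.2) 0 + PySem.List.pyGetD (PySem.List.pyGetD t i []) j 0)
        else d)).getD p 0 = d.getD p 0 + zadDlt t n p i j mv := by
    intro i j d mv _
    unfold zadDlt
    by_cases hc : (0 ≤ i + mv.1 ∧ i + mv.1 < n) ∧ (0 ≤ j + mv.2 ∧ j + mv.2 < n)
    · rw [if_pos hc, PySem.Dict.getD_insert]
      by_cases hp : p = (i + mv.1, j + mv.2)
      · rw [if_pos hp, if_pos ⟨hc, hp⟩]
        rw [hp]
      · rw [if_neg hp, if_neg (by tauto)]; ring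
    · rw [if_neg hc, if_neg (by tauto)]; ring
  have h2 : ∀ i (d : PySem.Dict (Int × Int) Int), ∀ j, j ∈ PySem.List.pyRange 0 n 1 →
      (([((-1:Int),(-1:Int)),(-1,0),(-1,1),(0,1),(1,1),(1,0),(1,-1),(0,-1)]).foldl (fun d mv =>
          if (0 ≤ i + mv.1 ∧ i + mv.1 < n) ∧ (0 ≤ j + mv.2 ∧ j + mv.2 < n) then
            d.insert (i + mv.1, j + mv.2)
              (d.getD (i + mv.1, j + mv.2) 0 + PySem.List.pyGetD (PySem.List.pyGetD t i []) j 0)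
          else d) d).getD p 0
        = d.getD p 0 + (([((-1:Int),(-1:Int)),(-1,0),(-1,1),(0,1),(1,1),(1,0),(1,-1),(0,-1)]).map
            (zadDlt t n p i j)).sum := by
    intro i d j _
    exact getD_foldl_add_entry p (zadDlt t n p i j) _ _ (fun d mv hmv => h3 i j d mv hmv) d
  have h1 : ∀ (d : PySem.Dict (Int × Int) Int), ∀ i, i ∈ PySem.List.pyRange 0 n 1 →
      ((PySem.List.pyRange 0 n 1).foldl (fun d j =>
          ([((-1:Int),(-1:Int)),(-1,0),(-1,1),(0,1),(1,1),(1,0),(1,-1),(0,-1)]).foldl (fun d mv =>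
            if (0 ≤ i + mv.1 ∧ i + mv.1 < n) ∧ (0 ≤ j + mv.2 ∧ j + mv.2 < n) then
              d.insert (i + mv.1, j + mv.2)
                (d.getD (i + mv.1, j + mv.2) 0 + PySem.List.pyGetD (PySem.List.pyGetD t i []) j 0)
            else d) d) d).getD p 0
        = d.getD p 0 + ((PySem.List.pyRange 0 n 1).map (fun j =>
            (([((-1:Int),(-1:Int)),(-1,0),(-1,1),(0,1),(1,1),(1,0),(1,-1),(0,-1)]).map
              (zadDlt t n p i j)).sum)).sum := by
    intro d i _
    exact getD_foldl_add_entry p _ _ _ (fun d j hj => h2 i d j hj) d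
  rw [getD_foldl_add_entry p _ _ _ (fun d i hi => h1 d i hi) PySem.Dict.empty]
  simp [PySem.Dict.getD_empty]

-- for an in-bounds target cell, the scattered total from one fixed move collapses
theorem dlt_collapse (t : List (List Int)) (n x y dx dy : Int)
    (hx : 0 ≤ x ∧ x < n) (hy : 0 ≤ y ∧ y < n) :
    ((PySem.List.pyRange 0 n 1).map (fun i =>
        ((PySem.List.pyRange 0 n 1).map (fun j => zadDlt t n (x, y) i j (dx, dy))).sum)).sum
      = if (0 ≤ x - dx ∧ x - dx < n) ∧ (0 ≤ y - dy ∧ y - dy < n) then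
          PySem.List.pyGetD (PySem.List.pyGetD t (x - dx) []) (y - dy) 0
        else 0 := by
  have hinner : ∀ i : Int,
      ((PySem.List.pyRange 0 n 1).map (fun j => zadDlt t n (x, y) i j (dx, dy))).sum
        = if i = x - dx then
            (if 0 ≤ y - dy ∧ y - dy < n then
              PySem.List.pyGetD (PySem.List.pyGetD t i []) (y - dy) 0 else 0)
          else 0 := by
    intro i
    have hfun : (fun j => zadDlt t n (x, y) i j (dx, dy))
        = fun j => if j = y - dy then
            (if i = x - dx then PySem.List.pyGetD (PySem.List.pyGetD t i []) j 0 else 0)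
          else 0 := by
      funext j
      unfold zadDlt
      simp only [Prod.mk.injEq]
      by_cases h1 : j = y - dy
      · subst h1
        by_cases h2 : i = x - dx
        · subst h2
          rw [if_pos (by omega), if_pos rfl, if_pos rfl]
        · rw [if_neg (by intro hh; exact h2 (by omega)), if_pos rfl, if_neg h2]
      · rw [if_neg (by intro hh; exact h1 (by omega)), if_neg h1]
    rw [hfun, sum_delta]
    split_ifs <;> rfl
  rw [funext hinner, sum_delta]
  split_ifs <;> first | rfl | omega

-- A's gathered neighbor sum as a sum of conditional terms
theorem gather_fold (t : List (List Int)) (n i j : Int) :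
    ([((-1:Int),(-1:Int)),(-1,0),(-1,1),(0,1),(1,1),(1,0),(1,-1),(0,-1)]).foldl (fun sc mv =>
        if (0 ≤ i + mv.1 ∧ i + mv.1 < n) ∧ (0 ≤ j + mv.2 ∧ j + mv.2 < n) then
          sc + PySem.List.pyGetD (PySem.List.pyGetD t (i + mv.1) []) (j + mv.2) 0
        else sc) 0
      = (([((-1:Int),(-1:Int)),(-1,0),(-1,1),(0,1),(1,1),(1,0),(1,-1),(0,-1)]).map
          (fun mv : Int × Int =>
            if (0 ≤ i + mv.1 ∧ i + mv.1 < n) ∧ (0 ≤ j + mv.2 ∧ j + mv.2 < n) then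
              PySem.List.pyGetD (PySem.List.pyGetD t (i + mv.1) []) (j + mv.2) 0 else 0)).sum := by
  rw [PySem.List.foldl_congr_mem _ _ (fun sc (mv : Int × Int) =>
        sc + (if (0 ≤ i + mv.1 ∧ i + mv.1 < n) ∧ (0 ≤ j + mv.2 ∧ j + mv.2 < n) then
          PySem.List.pyGetD (PySem.List.pyGetD t (i + mv.1) []) (j + mv.2) 0 else 0)) _
        (by intro acc mv _; split_ifs with h <;> simp [h])]
  rw [PySem.List.foldl_add]
  ring

-- the central fact: for an in-bounds cell, the scatter table equals A's gather sum
theorem cell_eq (t : List (List Int)) (n x y : Int) (hx : 0 ≤ x ∧ x < n) (hy : 0 ≤ y ∧ y < n) :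
    ((PySem.List.pyRange 0 n 1).foldl (fun d i =>
        (PySem.List.pyRange 0 n 1).foldl (fun d j =>
          ([((-1:Int),(-1:Int)),(-1,0),(-1,1),(0,1),(1,1),(1,0),(1,-1),(0,-1)]).foldl (fun d mv =>
            if (0 ≤ i + mv.1 ∧ i + mv.1 < n) ∧ (0 ≤ j + mv.2 ∧ j + mv.2 < n) then
              d.insert (i + mv.1, j + mv.2)
                (d.getD (i + mv.1, j + mv.2) 0 + PySem.List.pyGetD (PySem.List.pyGetD t i []) j 0)
            else d) d) d)
        PySem.Dict.empty).getD (x, y) 0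
      = ([((-1:Int),(-1:Int)),(-1,0),(-1,1),(0,1),(1,1),(1,0),(1,-1),(0,-1)]).foldl (fun sc mv =>
          if (0 ≤ x + mv.1 ∧ x + mv.1 < n) ∧ (0 ≤ y + mv.2 ∧ y + mv.2 < n) then
            sc + PySem.List.pyGetD (PySem.List.pyGetD t (x + mv.1) []) (y + mv.2) 0
          else sc) 0 := by
  rw [scatter_getD, gather_fold]
  have s1 : ∀ i : Int,
      ((PySem.List.pyRange 0 n 1).map (fun j =>
        (([((-1:Int),(-1:Int)),(-1,0),(-1,1),(0,1),(1,1),(1,0),(1,-1),(0,-1)]).map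
          (zadDlt t n (x, y) i j)).sum)).sum
      = (([((-1:Int),(-1:Int)),(-1,0),(-1,1),(0,1),(1,1),(1,0),(1,-1),(0,-1)]).map (fun mv =>
          ((PySem.List.pyRange 0 n 1).map (fun j => zadDlt t n (x, y) i j mv)).sum)).sum :=
    fun i => sum_map_comm _ _ (fun j mv => zadDlt t n (x, y) i j mv)
  rw [funext s1, sum_map_comm]
  have s2 : ∀ mv : Int × Int,
      ((PySem.List.pyRange 0 n 1).map (fun i =>
        ((PySem.List.pyRange 0 n 1).map (fun j => zadDlt t n (x, y) i j mv)).sum)).sum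
      = if (0 ≤ x - mv.1 ∧ x - mv.1 < n) ∧ (0 ≤ y - mv.2 ∧ y - mv.2 < n) then
          PySem.List.pyGetD (PySem.List.pyGetD t (x - mv.1) []) (y - mv.2) 0
        else 0 := fun mv => dlt_collapse t n x y mv.1 mv.2 hx hy
  rw [List.map_congr_left (fun mv _ => s2 mv)]
  simp only [List.map_cons, List.map_nil, List.sum_cons, List.sum_nil, add_zero]
  have e1 : ∀ z : Int, z - -1 = z + 1 := fun z => by ring
  have e2 : ∀ z : Int, z - 0 = z := fun z => by ring
  have e4 : ∀ z : Int, z + -1 = z - 1 := fun z => by ring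
  simp only [e1, e2, e4]
  ring

-- we only compare the two components the ports return
theorem pairproj {a b : Int × Int × Int} (h : a = b) : (a.2.1, a.2.2) = (b.2.1, b.2.2) := by rw [h]

-- ===== VERDICT (by name: the statement is the Claim_ definition above) =====
theorem zad17_spec : Claim_equal_zad17 := by
  intro t _ _
  unfold Spec_zad17 zad17 zad17_alt
  apply pairproj
  apply PySem.List.foldl_congr_mem
  intro s i hmi
  rw [PySem.List.mem_pyRange_one] at hmi
  apply PySem.List.foldl_congr_mem
  intro s' j hmj
  rw [PySem.List.mem_pyRange_one] at hmj
  have hcell := cell_eq t (PySem.List.len t) i j hmi hmj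
  rw [hcell]
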